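-- pv_equiv track=rewrite | github.com/madhusudan039/RepositoryMining | RepositoryMining.py | reduceCommitInfo
-- ===== SOURCE A (Python) =====
-- def reduceCommitInfo(commit_dict, module_list):
--     commit_count_dict = {}
--     churn_count_dict = {}
--     for module in module_list:
--         commit_count_dict[module] = 0
--         churn_count_dict[module] = 0
--
--     for file, commit_list in commit_dict.items():
--         commit_count = len(commit_list)
--         churn_count = 0
--         for pos_count, neg_count in commit_list:
--             churn_count = churn_count + pos_count + neg_count
--
--         for module in module_list:
--             if file.startswith(module)==True:
--                 commit_count_dict[module] += commit_count
--                 churn_count_dict[module] += churn_count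
--                 break
--     return commit_count_dict, churn_count_dict
-- ===== SOURCE B (Python) =====
-- def reduceCommitInfo(commit_dict, module_list):
--     # first-occurrence index of each module string
--     index = {}
--     i = 0
--     for m in module_list:
--         if m not in index:
--             index[m] = i
--         i += 1
--     n = len(module_list)
--     commit_count_dict = {}
--     churn_count_dict = {}
--     for m in module_list:
--         commit_count_dict[m] = 0
--         churn_count_dict[m] = 0
--     for file, commit_list in commit_dict.items():
--         best = n
--         for k in range(len(file) + 1):
--             j = index.get(file[:k], n)
--             if j < best:
--                 best = j
--         if best < n:
--             m = module_list[best]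
--             commit_count_dict[m] += len(commit_list)
--             churn_count_dict[m] += sum(p + q for p, q in commit_list)
--     return commit_count_dict, churn_count_dict
-- ===== Notes on version B (the rewrite author's own statement) =====
-- stated objective: alternative
-- what changed: Replaces A's per-file linear scan over module_list by a first-occurrence index dict built once and queried with each prefix of the file name, taking the minimum module index over all matching prefixes.
import Mathlib
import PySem

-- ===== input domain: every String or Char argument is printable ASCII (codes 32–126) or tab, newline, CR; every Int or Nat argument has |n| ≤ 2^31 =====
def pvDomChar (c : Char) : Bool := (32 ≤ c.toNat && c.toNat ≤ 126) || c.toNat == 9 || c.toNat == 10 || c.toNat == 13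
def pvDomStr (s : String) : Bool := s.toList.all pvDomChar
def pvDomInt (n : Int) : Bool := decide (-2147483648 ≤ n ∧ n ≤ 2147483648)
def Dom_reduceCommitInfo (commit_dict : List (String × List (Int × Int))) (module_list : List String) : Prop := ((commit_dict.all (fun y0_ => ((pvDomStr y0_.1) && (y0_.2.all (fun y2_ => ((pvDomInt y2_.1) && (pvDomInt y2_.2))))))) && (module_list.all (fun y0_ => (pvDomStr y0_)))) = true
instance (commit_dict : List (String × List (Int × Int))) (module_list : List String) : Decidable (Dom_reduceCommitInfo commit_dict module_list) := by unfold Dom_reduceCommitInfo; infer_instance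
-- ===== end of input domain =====

-- B replaces A's per-file inner scan over module_list by a first-occurrence index dict queried
-- with each prefix of the file name (objective: alternative algorithm; removes the O(M) inner scan).

-- ===== PORT A =====
-- churn_count = 0; for pos_count, neg_count in commit_list: churn_count = churn_count + pos_count + neg_count
def pvChurnA (cl : List (Int × Int)) : Int := cl.foldl (fun c pn => c + pn.1 + pn.2) 0

-- the inner 'for module in module_list: if file.startswith(module)==True: …; break' loop
def pvModLoopA (file : String) (cc ch : Int)
    (st : PySem.Dict String Int × PySem.Dict String Int) :
    List String → PySem.Dict String Int × PySem.Dict String Int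
  | [] => st
  | m :: rest =>
    if PySem.Str.startswith file m = true then
      (st.1.insert m (st.1.getD m 0 + cc), st.2.insert m (st.2.getD m 0 + ch))
    else pvModLoopA file cc ch st rest

def reduceCommitInfo (commit_dict : List (String × List (Int × Int))) (module_list : List String) : (List (String × Int)) × (List (String × Int)) :=
  let init : PySem.Dict String Int × PySem.Dict String Int :=
    module_list.foldl (fun st m => (st.1.insert m 0, st.2.insert m 0))
      (PySem.Dict.empty, PySem.Dict.empty)
  let fin := commit_dict.foldl (fun st fc =>
      pvModLoopA fc.1 (fc.2.length : Int) (pvChurnA fc.2) st module_list) init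
  (fin.1.items, fin.2.items)

-- ===== PORT B =====
-- index = {}; i = 0; for m in module_list: if m not in index: index[m] = i; i += 1
def pvIndexB (ms : List String) : PySem.Dict String Int :=
  (ms.foldl (fun (s : PySem.Dict String Int × Int) m =>
      ((if s.1.contains m then s.1 else s.1.insert m s.2), s.2 + 1))
    (PySem.Dict.empty, 0)).1

-- best = n; for k in range(len(file) + 1): j = index.get(file[:k], n); if j < best: best = j
def pvBestB (index : PySem.Dict String Int) (n : Int) (file : String) : Int :=
  (PySem.List.pyRange 0 (PySem.Str.len file + 1) 1).foldl
    (fun best k =>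
      let j := index.getD (String.ofList (PySem.List.slice file.toList none (some k))) n
      if j < best then j else best) n

def reduceCommitInfo_alt (commit_dict : List (String × List (Int × Int))) (module_list : List String) : (List (String × Int)) × (List (String × Int)) :=
  let index := pvIndexB module_list
  let n : Int := (module_list.length : Int)
  let init : PySem.Dict String Int × PySem.Dict String Int :=
    module_list.foldl (fun st m => (st.1.insert m 0, st.2.insert m 0))
      (PySem.Dict.empty, PySem.Dict.empty)
  let fin := commit_dict.foldl (fun st fc =>
      let best := pvBestB index n fc.1
      if best < n then
        let m := PySem.List.pyGetD module_list best ""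
        (st.1.insert m (st.1.getD m 0 + (fc.2.length : Int)),
         st.2.insert m (st.2.getD m 0 + (fc.2.map (fun pn => pn.1 + pn.2)).sum))
      else st) init
  (fin.1.items, fin.2.items)

-- ===== PRECONDITION & SPEC =====
def Spec_reduceCommitInfo (commit_dict : List (String × List (Int × Int))) (module_list : List String) (out : (List (String × Int)) × (List (String × Int))) : Prop := out = reduceCommitInfo_alt commit_dict module_list
instance (commit_dict : List (String × List (Int × Int))) (module_list : List String) (out : (List (String × Int)) × (List (String × Int))) : Decidable (Spec_reduceCommitInfo commit_dict module_list out) := by unfold Spec_reduceCommitInfo; infer_instance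

-- ===== CLAIM (what is proved, stated in full; the proofs are below) =====
def Claim_equal_reduceCommitInfo : Prop := ∀ (commit_dict : List (String × List (Int × Int))) (module_list : List String), Dom_reduceCommitInfo commit_dict module_list → Spec_reduceCommitInfo commit_dict module_list (reduceCommitInfo commit_dict module_list)

-- ===== LEMMAS AND PROOFS =====

theorem pvChurnA_eq (cl : List (Int × Int)) :
    pvChurnA cl = (cl.map (fun pn => pn.1 + pn.2)).sum := by
  have h : ∀ a : Int, cl.foldl (fun c pn => c + pn.1 + pn.2) a
      = a + (cl.map (fun pn => pn.1 + pn.2)).sum := by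
    induction cl with
    | nil => simp
    | cons p t ih => intro a; simp only [List.foldl_cons, List.map_cons, List.sum_cons, ih]; ring
  simpa using h 0

-- A's inner loop updates at the FIRST module that is a prefix of file (List.findIdx convention:
-- findIdx = length when nothing matches)
theorem pvModLoopA_eq (file : String) (cc ch : Int)
    (st : PySem.Dict String Int × PySem.Dict String Int) (ms : List String) :
    pvModLoopA file cc ch st ms =
      if h : ms.findIdx (fun m => PySem.Str.startswith file m) < ms.length then
        let m := ms[ms.findIdx (fun m => PySem.Str.startswith file m)]'h
        (st.1.insert m (st.1.getD m 0 + cc), st.2.insert m (st.2.getD m 0 + ch))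
      else st := by
  induction ms with
  | nil => simp [pvModLoopA]
  | cons m rest ih =>
    simp only [pvModLoopA, List.findIdx_cons]
    by_cases h : PySem.Str.startswith file m = true
    · rw [if_pos h]
      simp only [h, cond_true]
      simp
    · have h' : PySem.Str.startswith file m = false := by simpa using h
      rw [if_neg h]
      simp only [h', cond_false]
      rw [ih]
      by_cases hlt : rest.findIdx (fun m => PySem.Str.startswith file m) < rest.length
      · rw [dif_pos hlt, dif_pos (by simpa [List.length_cons] using Nat.succ_lt_succ hlt)]
        simp
      · rw [dif_neg hlt, dif_neg (by simp only [List.length_cons]; omega)]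

-- invariant of B's index-building loop, with an arbitrary starting dict and counter
theorem pvIndexB_aux (ms : List String) :
    ∀ (d : PySem.Dict String Int) (i : Int) (m : String),
    ((ms.foldl (fun (s : PySem.Dict String Int × Int) x =>
        ((if s.1.contains x then s.1 else s.1.insert x s.2), s.2 + 1)) (d, i)).1).get? m =
      (match d.get? m with
       | some v => some v
       | none => if m ∈ ms then some (i + (ms.idxOf m : Int)) else none) := by
  induction ms with
  | nil => intro d i m; cases h : d.get? m <;> simp [h]
  | cons x rest ih =>
    intro d i m
    simp only [List.foldl_cons]
    rw [ih]
    by_cases hc : d.contains x = true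
    · rw [if_pos hc]
      cases hdm : d.get? m with
      | some v => simp
      | none =>
        have hxm : x ≠ m := by
          intro he; subst he
          rw [PySem.Dict.contains_eq_isSome_get?, hdm] at hc; simp at hc
        have hbe : (x == m) = false := by simp [hxm]
        simp only [List.idxOf_cons, hbe, cond_false, List.mem_cons]
        by_cases hmem : m ∈ rest
        · simp only [hmem, or_true, if_true]
          congr 1
          push_cast
          ring
        · simp only [hmem, or_false, Ne.symm hxm, if_false]
    · rw [if_neg hc]
      have hdx : d.get? x = none := by
        rw [PySem.Dict.contains_eq_isSome_get?] at hc
        cases h : d.get? x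
        · rfl
        · rw [h] at hc; simp at hc
      by_cases hxm : x = m
      · subst hxm
        rw [PySem.Dict.get?_insert_self, hdx]
        simp [List.idxOf_cons_self]
      · rw [PySem.Dict.get?_insert_of_ne _ _ (Ne.symm hxm)]
        cases hdm : d.get? m with
        | some v => simp
        | none =>
          have hbe : (x == m) = false := by simp [hxm]
          simp only [List.idxOf_cons, hbe, cond_false, List.mem_cons]
          by_cases hmem : m ∈ rest
          · simp only [hmem, or_true, if_true]
            congr 1
            push_cast
            ring
          · simp only [hmem, or_false, Ne.symm hxm, if_false]

-- B's index dict maps each module present in ms to its first index, and nothing else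
theorem pvIndexB_get? (ms : List String) (m : String) :
    (pvIndexB ms).get? m = if m ∈ ms then some ((ms.idxOf m : Nat) : Int) else none := by
  unfold pvIndexB
  rw [pvIndexB_aux]
  simp [PySem.Dict.get?_empty]

-- findIdx is a lower bound for every index whose element satisfies the predicate
theorem findIdx_le_of_pred {α : Type} (Q : α → Bool) (ms : List α) (i : Nat)
    (hi : i < ms.length) (hQ : Q (ms[i]'hi) = true) : ms.findIdx Q ≤ i := by
  induction ms generalizing i with
  | nil => simp at hi
  | cons x rest ih =>
    rw [List.findIdx_cons]
    cases hx : Q x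
    · simp only [cond_false]
      cases i with
      | zero =>
        rw [List.getElem_cons_zero] at hQ
        rw [hQ] at hx
        cases hx
      | succ j =>
        have := ih j (by simpa [List.length_cons] using hi) (by simpa using hQ)
        omega
    · simp [cond_true]

theorem startswith_iff_prefix (file m : String) :
    PySem.Str.startswith file m = true ↔ m.toList <+: file.toList := by
  rw [PySem.Str.startswith_eq]
  exact PySem.Chars.startswith_iff _ _

-- the crux: B's best-prefix scan computes exactly the index of A's first matching module
theorem pvBestB_eq (ms : List String) (file : String) :
    pvBestB (pvIndexB ms) (ms.length : Int) file =
      ((ms.findIdx (fun m => PySem.Str.startswith file m) : Nat) : Int) := by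
  set n : Int := (ms.length : Int) with hn
  set F : Int → Int := fun k =>
    (pvIndexB ms).getD (String.ofList (PySem.List.slice file.toList none (some k))) n with hF
  have hfold : pvBestB (pvIndexB ms) n file
      = ((PySem.List.pyRange 0 (PySem.Str.len file + 1) 1).map F).foldl min n := by
    unfold pvBestB
    rw [List.foldl_map]
    apply PySem.List.foldl_congr_mem
    intro acc k _
    simp only [hF, min_def]
    split_ifs <;> omega
  rw [hfold]
  set r : Int := ((PySem.List.pyRange 0 (PySem.Str.len file + 1) 1).map F).foldl min n with hr
  have hub : r ≤ n := (PySem.List.foldl_min_le _ n).1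
  have hlbF : ∀ y ∈ (PySem.List.pyRange 0 (PySem.Str.len file + 1) 1).map F, r ≤ y :=
    (PySem.List.foldl_min_le _ n).2
  have hmem : r = n ∨ r ∈ (PySem.List.pyRange 0 (PySem.Str.len file + 1) 1).map F :=
    PySem.List.foldl_min_mem _ n
  -- every looked-up value is at least the index of the first matching module
  have hkey : ∀ k ∈ PySem.List.pyRange 0 (PySem.Str.len file + 1) 1,
      ((ms.findIdx (fun m => PySem.Str.startswith file m) : Nat) : Int) ≤ F k := by
    intro k hk
    have hk0 : 0 ≤ k := (PySem.List.mem_pyRange_one.mp hk).1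
    simp only [hF]
    rw [PySem.List.slice_to _ hk0]
    set s : String := String.ofList (file.toList.take k.toNat) with hs
    by_cases hmem2 : s ∈ ms
    · have hget := pvIndexB_get? ms s
      rw [if_pos hmem2] at hget
      rw [PySem.Dict.getD_of_get?_eq_some _ _ hget]
      have hidx : ms.idxOf s < ms.length := List.idxOf_lt_length_of_mem hmem2
      have hgelem : ms[ms.idxOf s]'hidx = s := List.getElem_idxOf hidx
      have hpref : s.toList <+: file.toList := by
        rw [hs, String.toList_ofList]
        exact List.take_prefix _ _
      have hle : ms.findIdx (fun m => PySem.Str.startswith file m) ≤ ms.idxOf s := by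
        apply findIdx_le_of_pred _ ms (ms.idxOf s) hidx
        rw [hgelem]
        exact (startswith_iff_prefix _ _).mpr hpref
      exact_mod_cast hle
    · have hget := pvIndexB_get? ms s
      rw [if_neg hmem2] at hget
      rw [PySem.Dict.getD_of_get?_eq_none _ _ hget, hn]
      exact_mod_cast List.findIdx_le_length
        (p := fun m => PySem.Str.startswith file m) (xs := ms)
  have hrlb : ((ms.findIdx (fun m => PySem.Str.startswith file m) : Nat) : Int) ≤ r := by
    rcases hmem with h | h
    · rw [h, hn]
      exact_mod_cast List.findIdx_le_length
        (p := fun m => PySem.Str.startswith file m) (xs := ms)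
    · rcases List.mem_map.mp h with ⟨k, hk, hFk⟩
      rw [← hFk]
      exact hkey k hk
  by_cases hlt : ms.findIdx (fun m => PySem.Str.startswith file m) < ms.length
  · -- a match exists; the lookup at k = |ms[findIdx]| attains it
    have hQI : PySem.Str.startswith file
        (ms[ms.findIdx (fun m => PySem.Str.startswith file m)]'hlt) = true :=
      List.findIdx_getElem (w := hlt)
    have hpref := (startswith_iff_prefix _ _).mp hQI
    have hlen := hpref.length_le
    have hkmem : ((ms[ms.findIdx (fun m => PySem.Str.startswith file m)]'hlt).toList.length : Int)
        ∈ PySem.List.pyRange 0 (PySem.Str.len file + 1) 1 := by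
      rw [PySem.List.mem_pyRange_one, PySem.Str.len_eq]
      omega
    have hFk : F ((ms[ms.findIdx (fun m => PySem.Str.startswith file m)]'hlt).toList.length : Int)
        = (ms.idxOf (ms[ms.findIdx (fun m => PySem.Str.startswith file m)]'hlt) : Int) := by
      simp only [hF]
      rw [PySem.List.slice_to _ (by omega)]
      have htake : file.toList.take
          ((((ms[ms.findIdx (fun m => PySem.Str.startswith file m)]'hlt).toList.length : Nat) : Int)).toNat
          = (ms[ms.findIdx (fun m => PySem.Str.startswith file m)]'hlt).toList := by
        simp only [Int.toNat_natCast]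
        exact (List.prefix_iff_eq_take.mp hpref).symm
      rw [htake, String.ofList_toList]
      have hget := pvIndexB_get? ms (ms[ms.findIdx (fun m => PySem.Str.startswith file m)]'hlt)
      rw [if_pos (List.getElem_mem hlt)] at hget
      rw [PySem.Dict.getD_of_get?_eq_some _ _ hget]
    have hidxle : ms.idxOf (ms[ms.findIdx (fun m => PySem.Str.startswith file m)]'hlt)
        ≤ ms.findIdx (fun m => PySem.Str.startswith file m) := by
      apply findIdx_le_of_pred _ ms _ hlt
      simp
    have hrub : r ≤ ((ms.findIdx (fun m => PySem.Str.startswith file m) : Nat) : Int) := by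
      have := hlbF _ (List.mem_map.mpr ⟨_, hkmem, rfl⟩)
      rw [hFk] at this
      omega
    omega
  · have heq : ms.findIdx (fun m => PySem.Str.startswith file m) = ms.length :=
      Nat.le_antisymm List.findIdx_le_length (by omega)
    rw [heq] at hrlb
    omega

-- ===== VERDICT (by name: the statement is the Claim_ definition above) =====
theorem reduceCommitInfo_spec : Claim_equal_reduceCommitInfo := by
  intro commit_dict module_list _
  unfold Spec_reduceCommitInfo reduceCommitInfo reduceCommitInfo_alt
  dsimp only
  have hfun : (fun (st : PySem.Dict String Int × PySem.Dict String Int)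
        (fc : String × List (Int × Int)) =>
        pvModLoopA fc.1 (fc.2.length : Int) (pvChurnA fc.2) st module_list)
      = (fun st fc =>
        let best := pvBestB (pvIndexB module_list) (module_list.length : Int) fc.1
        if best < (module_list.length : Int) then
          let m := PySem.List.pyGetD module_list best ""
          (st.1.insert m (st.1.getD m 0 + (fc.2.length : Int)),
           st.2.insert m (st.2.getD m 0 + (fc.2.map (fun pn => pn.1 + pn.2)).sum))
        else st) := by
    funext st fc
    rw [pvModLoopA_eq, pvBestB_eq, pvChurnA_eq]
    dsimp only
    by_cases h : module_list.findIdx (fun m => PySem.Str.startswith fc.1 m) < module_list.length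
    · rw [dif_pos h, if_pos (by exact_mod_cast h)]
      have hm : PySem.List.pyGetD module_list
          ((module_list.findIdx (fun m => PySem.Str.startswith fc.1 m) : Nat) : Int) ""
          = module_list[module_list.findIdx (fun m => PySem.Str.startswith fc.1 m)]'h := by
        rw [PySem.List.pyGetD_natCast, List.getD_eq_getElem?_getD, List.getElem?_eq_getElem h]
        rfl
      rw [hm]
    · rw [dif_neg h, if_neg (by exact_mod_cast h)]
  rw [hfun]
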